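-- pv_equiv track=rewrite | github.com/holl-/TrainControl | fpme/signal_gen.py | function_bytes
-- ===== SOURCE A (Python) =====
-- def function_bytes(speed: int, function: int, status: bool):
--     speed = speed or 0
--     if function == 1:
--         if speed == 3 and not status:
--             b2, b4, b6, b8 = 1, 0, 1, 0
--         elif speed == 11 and status:
--             b2, b4, b6, b8 = 0, 1, 0, 1
--         else:
--             b2, b4, b6, b8 = 1, 1, 0, status
--     elif function == 2:
--         if speed == 4 and not status:
--             b2, b4, b6, b8 = 1, 0, 1, 0
--         elif speed == 12 and status:
--             b2, b4, b6, b8 = 0, 1, 0, 1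
--         else:
--             b2, b4, b6, b8 = 0, 0, 1, status
--     elif function == 3:
--         if speed == 6 and not status:
--             b2, b4, b6, b8 = 1, 0, 1, 0
--         elif speed == 14 and status:
--             b2, b4, b6, b8 = 0, 1, 0, 1
--         else:
--             b2, b4, b6, b8 = 0, 1, 1, status
--     elif function == 4:
--         if speed == 7 and not status:
--             b2, b4, b6, b8 = 1, 0, 1, 0
--         elif speed == 15 and status:
--             b2, b4, b6, b8 = 0, 1, 0, 1
--         else:
--             b2, b4, b6, b8 = 1, 1, 1, status
--     else:
--         raise ValueError(function)
--     bits = [speed & 1, b2, (speed >> 1) & 1, b4, (speed >> 2) & 1, b6, speed >> 3, b8]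
--     return tuple(0 if b else 63 for b in bits)
-- ===== SOURCE B (Python) =====
-- def function_bytes(speed: int, function: int, status: bool):
--     speed = speed or 0
--     if function < 1 or function > 4:
--         raise ValueError(function)
--     # Key fact: the default flag triple (b2,b4,b6), read as a 3-bit number
--     # b2 + 2*b4 + 4*b6, EQUALS the function's low special speed (3,4,6,7),
--     # and the high special speed is low + 8.  So one closed form
--     # low = function + 2 + (function >= 3) replaces all per-function data,
--     # and the four flags live in a single bitmask.
--     low = function + 2 + (function >= 3)
--     if speed == low and not status:
--         flags = 0b0101            # b2, b6 set
--     elif speed == low + 8 and status: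
--         flags = 0b1010            # b4, b8 set
--     else:
--         flags = low + (8 if status else 0)
--     out = []
--     for k in range(4):
--         sb = speed >> 3 if k == 3 else (speed >> k) & 1
--         out.append(0 if sb else 63)
--         out.append(0 if (flags >> k) & 1 else 63)
--     return tuple(out)
-- ===== Notes on version B (the rewrite author's own statement) =====
-- stated objective: simpler
-- what changed: Replaces the four copy-pasted if/elif branches and the hand-written interleaved bit list with arithmetic: the low special speed is the closed form function+2+(function>=3), the default flag triple is exactly that number's bits and high = low+8, so the four flags become one integer bitmask and a single loop over 4 bit positions emits the 8 bytes.
import Mathlib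
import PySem

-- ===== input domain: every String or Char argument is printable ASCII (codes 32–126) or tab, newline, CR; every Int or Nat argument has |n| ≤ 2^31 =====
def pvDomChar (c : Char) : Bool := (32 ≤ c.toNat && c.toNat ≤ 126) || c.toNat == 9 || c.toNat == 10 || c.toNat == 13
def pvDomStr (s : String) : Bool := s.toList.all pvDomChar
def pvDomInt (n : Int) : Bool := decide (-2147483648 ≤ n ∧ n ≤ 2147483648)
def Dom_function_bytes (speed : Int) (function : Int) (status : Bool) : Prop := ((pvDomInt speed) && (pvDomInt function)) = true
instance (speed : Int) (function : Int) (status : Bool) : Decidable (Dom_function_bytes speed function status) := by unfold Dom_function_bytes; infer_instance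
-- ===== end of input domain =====

-- B replaces the four copy-pasted branches and the hand-written bit list with a
-- closed-form low-speed formula, a single flag bitmask and a loop over bit
-- positions (objective: simpler).


-- ===== PORT A =====
-- Literal transliteration of A.  `speed or 0` keeps speed unless it is falsy (0).
-- `0 if b else 63` maps truthy (≠ 0) to 0, else 63.  `x & 1` = emod 2, `x >> k` = fdiv 2^k
-- (Python's arithmetic/floor shift).  Where A raises ValueError we return [] and
-- exclude those inputs with Pre_function_bytes.
def function_bytes (speed : Int) (function : Int) (status : Bool) : List Int :=
  let speed : Int := if speed = 0 then 0 else speed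
  let quad? : Option (Int × Int × Int × Int) :=
    if function = 1 then
      some (if speed = 3 ∧ ¬ status then (1, 0, 1, 0)
            else if speed = 11 ∧ status then (0, 1, 0, 1)
            else (1, 1, 0, if status then 1 else 0))
    else if function = 2 then
      some (if speed = 4 ∧ ¬ status then (1, 0, 1, 0)
            else if speed = 12 ∧ status then (0, 1, 0, 1)
            else (0, 0, 1, if status then 1 else 0))
    else if function = 3 then
      some (if speed = 6 ∧ ¬ status then (1, 0, 1, 0)
            else if speed = 14 ∧ status then (0, 1, 0, 1)
            else (0, 1, 1, if status then 1 else 0))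
    else if function = 4 then
      some (if speed = 7 ∧ ¬ status then (1, 0, 1, 0)
            else if speed = 15 ∧ status then (0, 1, 0, 1)
            else (1, 1, 1, if status then 1 else 0))
    else none  -- raise ValueError(function)
  match quad? with
  | none => []
  | some (b2, b4, b6, b8) =>
    let bits : List Int := [speed.emod 2, b2, (speed.fdiv 2).emod 2, b4,
                            (speed.fdiv 4).emod 2, b6, speed.fdiv 8, b8]
    bits.map (fun b => if b ≠ 0 then 0 else 63)

-- ===== PORT B =====
-- Transliteration of Source B: closed-form low speed, one flag bitmask, one loop over
-- the 4 bit positions appending two bytes each.  `>>` on Int is fdiv by 2^k,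
-- `& 1` is emod 2 (exact for Python's floor-shift semantics); the ValueError
-- branch returns [] (excluded by Pre_function_bytes).
def function_bytes_alt (speed : Int) (function : Int) (status : Bool) : List Int :=
  let speed : Int := if speed = 0 then 0 else speed
  if function < 1 ∨ function > 4 then []  -- raise ValueError(function)
  else
    let low : Int := function + 2 + (if function ≥ 3 then 1 else 0)
    let flags : Int :=
      if speed = low ∧ ¬ status then 5       -- 0b0101
      else if speed = low + 8 ∧ status then 10  -- 0b1010
      else low + (if status then 8 else 0)
    List.foldl (fun out (k : Nat) =>
      let sb : Int := if k = 3 then speed.fdiv 8 else (speed.fdiv (2 ^ k)).emod 2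
      out ++ [if sb ≠ 0 then 0 else 63,
              if (flags.fdiv (2 ^ k)).emod 2 ≠ 0 then 0 else 63])
      [] [0, 1, 2, 3]

-- ===== PRECONDITION & SPEC =====
-- A raises ValueError unless function is 1, 2, 3 or 4; exactly those inputs are excluded.
def Pre_function_bytes (speed : Int) (function : Int) (status : Bool) : Prop :=
  function = 1 ∨ function = 2 ∨ function = 3 ∨ function = 4
instance (speed : Int) (function : Int) (status : Bool) : Decidable (Pre_function_bytes speed function status) := by unfold Pre_function_bytes; infer_instance
def pvWitness_function_bytes : Int × Int × Bool := (3, 1, false)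

def Spec_function_bytes (speed : Int) (function : Int) (status : Bool) (out : List Int) : Prop := out = function_bytes_alt speed function status
instance (speed : Int) (function : Int) (status : Bool) (out : List Int) : Decidable (Spec_function_bytes speed function status out) := by unfold Spec_function_bytes; infer_instance

-- ===== CLAIM (what is proved, stated in full; the proofs are below) =====
def Claim_equal_function_bytes : Prop := ∀ (speed : Int) (function : Int) (status : Bool), Dom_function_bytes speed function status → Pre_function_bytes speed function status → Spec_function_bytes speed function status (function_bytes speed function status)

-- ===== LEMMAS AND PROOFS =====
-- `speed or 0` is the identity on Int.
lemma speed_or_zero (s : Int) : (if s = 0 then (0:Int) else s) = s := by split_ifs <;> omega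

lemma fb_case1 (speed : Int) (status : Bool) :
    function_bytes speed 1 status = function_bytes_alt speed 1 status := by
  simp only [function_bytes, function_bytes_alt, List.foldl, speed_or_zero]
  norm_num
  cases status with
  | false =>
    by_cases hsp : speed = 3
    · subst hsp; decide
    · simp only [hsp]; norm_num [Int.fdiv]
  | true =>
    by_cases hsp : speed = 11
    · subst hsp; decide
    · simp only [hsp]; norm_num [Int.fdiv]

lemma fb_case2 (speed : Int) (status : Bool) :
    function_bytes speed 2 status = function_bytes_alt speed 2 status := by
  simp only [function_bytes, function_bytes_alt, List.foldl, speed_or_zero]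
  norm_num
  cases status with
  | false =>
    by_cases hsp : speed = 4
    · subst hsp; decide
    · simp only [hsp]; norm_num [Int.fdiv]
  | true =>
    by_cases hsp : speed = 12
    · subst hsp; decide
    · simp only [hsp]; norm_num [Int.fdiv]

lemma fb_case3 (speed : Int) (status : Bool) :
    function_bytes speed 3 status = function_bytes_alt speed 3 status := by
  simp only [function_bytes, function_bytes_alt, List.foldl, speed_or_zero]
  norm_num
  cases status with
  | false =>
    by_cases hsp : speed = 6
    · subst hsp; decide
    · simp only [hsp]; norm_num [Int.fdiv]
  | true =>
    by_cases hsp : speed = 14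
    · subst hsp; decide
    · simp only [hsp]; norm_num [Int.fdiv]

lemma fb_case4 (speed : Int) (status : Bool) :
    function_bytes speed 4 status = function_bytes_alt speed 4 status := by
  simp only [function_bytes, function_bytes_alt, List.foldl, speed_or_zero]
  norm_num
  cases status with
  | false =>
    by_cases hsp : speed = 7
    · subst hsp; decide
    · simp only [hsp]; norm_num [Int.fdiv]
  | true =>
    by_cases hsp : speed = 15
    · subst hsp; decide
    · simp only [hsp]; norm_num [Int.fdiv]

-- ===== VERDICT (by name: the statement is the Claim_ definition above) =====
theorem function_bytes_spec : Claim_equal_function_bytes := by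
  intro speed function status _ hpre
  unfold Spec_function_bytes
  rcases hpre with h | h | h | h <;> subst h
  · exact fb_case1 speed status
  · exact fb_case2 speed status
  · exact fb_case3 speed status
  · exact fb_case4 speed status
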